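-- pv_equiv track=rewrite | github.com/jmussmann/adventofcode2023 | Day-03/sol2.py | get_adj_numbers_prod
-- ===== SOURCE A (Python) =====
-- def get_adj_numbers_prod(pos_x, pos_y, width, height, lines):
--
--     nums=[]
--     for i in range(-1, 2):
--         idx_first_num = None
--         for j in range(-1, 2):
--             idx_x = pos_x + j
--             idx_y = pos_y + i
--             if idx_x >= 0 and idx_x < width and idx_y >= 0 and idx_y < height:
--                 el = lines[idx_y][idx_x]
--                 if el.isnumeric():
--                     num, idx_start = get_comp_number(idx_x, idx_y, lines)
--                     if idx_first_num is None or idx_first_num != idx_start: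
--                         nums.append(num)
--                         idx_first_num = idx_start
--     if len(nums) == 2:
--         return nums[0] * nums[1]
--     return 0
--
-- def get_comp_number(pos_x, pos_y, lines):
--
--     idx = pos_x
--
--     while idx > 0:
--         if lines[pos_y][idx-1].isnumeric():
--             idx -= 1
--         else:
--             break
--     idx_start = idx
--
--     canidate = []
--     while idx < len(lines[pos_y]):
--         if lines[pos_y][idx].isnumeric():
--             canidate.append(lines[pos_y][idx])
--             idx +=1
--         else:
--             break
--     return int("".join(canidate)), idx_start
-- ===== SOURCE B (Python) =====
-- def get_adj_numbers_prod(pos_x, pos_y, width, height, lines):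
--     lo = max(0, pos_x - 1)
--     hi = min(width - 1, pos_x + 1)
--     if lo > hi:
--         return 0
--     vals = []
--     for row in range(pos_y - 1, pos_y + 2):
--         if 0 <= row < height:
--             for start, end, val in tokenize(lines[row]):
--                 if start <= hi and lo <= end:
--                     vals.append(val)
--     return vals[0] * vals[1] if len(vals) == 2 else 0
--
--
-- def tokenize(line):
--     """Parse a whole line into maximal digit runs as (start, end, value) tokens."""
--     toks = []
--     i = 0
--     n = len(line)
--     while i < n:
--         if line[i].isnumeric():
--             j = i
--             while j < n and line[j].isnumeric():
--                 j += 1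
--             toks.append((i, j - 1, int(line[i:j])))
--             i = j
--         else:
--             i += 1
--     return toks
-- ===== Notes on version B (the rewrite author's own statement) =====
-- stated objective: alternative
-- what changed: Instead of expanding a number from each adjacent digit cell (left/right scans per cell) and deduplicating by remembered start index, B tokenizes each adjacent row once into maximal digit runs (start, end, value) and selects the tokens whose column span intersects the clamped 3-column window, which dedups numbers naturally.
-- crash fix: On inputs where the 3x3 window contains a cell inside [0,width)x[0,height) but beyond the actual lines list or beyond that line's length, A raises IndexError; B returns normally (0 or a product) whenever every in-range adjacent row index is a valid index into lines (or the column window is empty). — e.g. on get_adj_numbers_prod(1, 0, 3, 1, ["12"]): A raises IndexError, B returns 0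
import Mathlib
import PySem

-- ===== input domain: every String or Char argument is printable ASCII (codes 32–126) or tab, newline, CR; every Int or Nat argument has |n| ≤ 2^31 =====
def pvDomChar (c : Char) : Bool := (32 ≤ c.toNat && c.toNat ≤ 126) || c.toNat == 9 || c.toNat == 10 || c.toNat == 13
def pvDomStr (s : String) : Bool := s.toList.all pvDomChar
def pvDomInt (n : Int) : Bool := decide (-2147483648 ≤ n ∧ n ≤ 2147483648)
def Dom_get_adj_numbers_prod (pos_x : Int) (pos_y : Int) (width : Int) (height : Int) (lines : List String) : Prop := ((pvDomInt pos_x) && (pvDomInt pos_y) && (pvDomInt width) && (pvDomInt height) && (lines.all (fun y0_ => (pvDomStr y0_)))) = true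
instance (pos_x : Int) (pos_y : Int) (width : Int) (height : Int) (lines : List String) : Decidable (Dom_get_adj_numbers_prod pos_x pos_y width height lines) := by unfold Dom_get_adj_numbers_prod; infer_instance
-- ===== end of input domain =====

-- B re-implements A by tokenizing each adjacent row once into maximal digit runs and selecting
-- the runs whose span meets the clamped 3-column window (objective: alternative algorithm).

-- ===== PORT A =====
-- Python's str.isnumeric() on a single character: on the printable-ASCII domain this is exactly '0'..'9'.
def pyNum (c : Char) : Bool := c.isDigit

-- 'while idx > 0: if lines[pos_y][idx-1].isnumeric(): idx -= 1 else: break'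
def scanLeftA (s : List Char) : Nat → Nat
  | 0 => 0
  | k+1 => if pyNum (s.getD k ' ') then scanLeftA s k else k+1

-- 'while idx < len(lines[pos_y]): if lines[pos_y][idx].isnumeric(): canidate.append(...); idx += 1 else: break'
def scanRightA (s : List Char) (idx : Nat) : List Char :=
  if h : idx < s.length then
    if pyNum (s.getD idx ' ') then s.getD idx ' ' :: scanRightA s (idx+1) else []
  else []
  termination_by s.length - idx
  decreasing_by omega

-- A only calls this with 0 ≤ pos_x < len(line) and 0 ≤ pos_y < len(lines), so the
-- .getD defaults and the .toNat are never reached on those calls.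
def get_comp_number (pos_x : Int) (pos_y : Int) (lines : List String) : Int × Int :=
  let s := ((PySem.List.pyGet? lines pos_y).getD "").toList
  let idx_start := scanLeftA s pos_x.toNat
  let cand := scanRightA s idx_start
  ((PySem.Int.ofChars? cand).getD 0, (idx_start : Int))

def get_adj_numbers_prod (pos_x : Int) (pos_y : Int) (width : Int) (height : Int) (lines : List String) : Int :=
  let nums : List Int := (PySem.List.pyRange (-1) 2 1).foldl (fun nums i =>
    ((PySem.List.pyRange (-1) 2 1).foldl (fun (st : Option Int × List Int) j =>
      let idx_x := pos_x + j
      let idx_y := pos_y + i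
      if 0 ≤ idx_x ∧ idx_x < width ∧ 0 ≤ idx_y ∧ idx_y < height then
        match (PySem.List.pyGet? lines idx_y).bind (fun line => PySem.Str.pyGet? line idx_x) with
        | some el =>
          if pyNum el then
            let t := get_comp_number idx_x idx_y lines
            if st.1 = none ∨ st.1 ≠ some t.2 then (some t.2, st.2 ++ [t.1]) else st
          else st
        | none => st
      else st) (none, nums)).2) []
  if nums.length = 2 then PySem.List.pyGetD nums 0 0 * PySem.List.pyGetD nums 1 0 else 0

-- ===== PORT B =====
-- Source B's tokenize: one pass over the line producing (start, end, value) for each maximal digit run.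
def tokenize (s : List Char) (i : Int) : List (Int × Int × Int) :=
  match s with
  | [] => []
  | c :: rest =>
    if pyNum c then
      let run := (c :: rest).takeWhile pyNum
      (i, i + run.length - 1, (PySem.Int.ofChars? run).getD 0)
        :: tokenize ((c :: rest).dropWhile pyNum) (i + run.length)
    else tokenize rest (i + 1)
  termination_by s.length
  decreasing_by
    · simp only [List.dropWhile_cons, *, if_pos]
      have := List.length_dropWhile_le pyNum rest
      simp only [List.length_cons]; omega
    · simp

def get_adj_numbers_prod_alt (pos_x : Int) (pos_y : Int) (width : Int) (height : Int) (lines : List String) : Int :=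
  let lo := max 0 (pos_x - 1)
  let hi := min (width - 1) (pos_x + 1)
  if lo > hi then 0
  else
    let vals : List Int := (PySem.List.pyRange (pos_y - 1) (pos_y + 2) 1).foldl (fun vals row =>
      if 0 ≤ row ∧ row < height then
        (tokenize ((PySem.List.pyGet? lines row).getD "").toList 0).foldl
          (fun vals t => if t.1 ≤ hi ∧ lo ≤ t.2.1 then vals ++ [t.2.2] else vals) vals
      else vals) []
    if vals.length = 2 then PySem.List.pyGetD vals 0 0 * PySem.List.pyGetD vals 1 0 else 0

-- ===== PRECONDITION & SPEC =====
-- Pre_ excludes exactly the inputs on which the Python A raises IndexError: some cell of the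
-- 3×3 window lies inside [0,width)×[0,height) but beyond the end of `lines` or of its row string.
def Pre_get_adj_numbers_prod (pos_x : Int) (pos_y : Int) (width : Int) (height : Int) (lines : List String) : Prop :=
  ∀ i ∈ ([-1, 0, 1] : List Int), ∀ j ∈ ([-1, 0, 1] : List Int),
    0 ≤ pos_y + i → pos_y + i < height → 0 ≤ pos_x + j → pos_x + j < width →
      (pos_y + i).toNat < lines.length ∧
      (pos_x + j).toNat < ((lines.getD (pos_y + i).toNat "").toList).length

instance (pos_x : Int) (pos_y : Int) (width : Int) (height : Int) (lines : List String) : Decidable (Pre_get_adj_numbers_prod pos_x pos_y width height lines) := by unfold Pre_get_adj_numbers_prod; infer_instance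

def pvWitness_get_adj_numbers_prod : Int × Int × Int × Int × List String := (1, 1, 3, 3, ["617*..", "...*12", "+.58.."])

-- On inputs where the window hits a column beyond a row string (but rows themselves exist, or the
-- column window is empty), A raises IndexError while B returns a value (it tokenizes whole rows).
def Raises_get_adj_numbers_prod (pos_x : Int) (pos_y : Int) (width : Int) (height : Int) (lines : List String) : Prop :=
  ¬ Pre_get_adj_numbers_prod pos_x pos_y width height lines ∧
    (min (width - 1) (pos_x + 1) < max 0 (pos_x - 1) ∨
      ∀ i ∈ ([-1, 0, 1] : List Int), 0 ≤ pos_y + i → pos_y + i < height →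
        (pos_y + i).toNat < lines.length)

instance (pos_x : Int) (pos_y : Int) (width : Int) (height : Int) (lines : List String) : Decidable (Raises_get_adj_numbers_prod pos_x pos_y width height lines) := by unfold Raises_get_adj_numbers_prod; infer_instance

def pvRaiseWitness_get_adj_numbers_prod : Int × Int × Int × Int × List String := (1, 0, 3, 1, ["12"])
def pvRaiseWitnessOut_get_adj_numbers_prod : Int := 0

def Spec_get_adj_numbers_prod (pos_x : Int) (pos_y : Int) (width : Int) (height : Int) (lines : List String) (out : Int) : Prop := out = get_adj_numbers_prod_alt pos_x pos_y width height lines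
instance (pos_x : Int) (pos_y : Int) (width : Int) (height : Int) (lines : List String) (out : Int) : Decidable (Spec_get_adj_numbers_prod pos_x pos_y width height lines out) := by unfold Spec_get_adj_numbers_prod; infer_instance

-- ===== CLAIM (what is proved, stated in full; the proofs are below) =====
def Claim_equal_get_adj_numbers_prod : Prop := ∀ (pos_x : Int) (pos_y : Int) (width : Int) (height : Int) (lines : List String), Dom_get_adj_numbers_prod pos_x pos_y width height lines → Pre_get_adj_numbers_prod pos_x pos_y width height lines → Spec_get_adj_numbers_prod pos_x pos_y width height lines (get_adj_numbers_prod pos_x pos_y width height lines)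

def Claim_raises_get_adj_numbers_prod : Prop := (∀ (pos_x : Int) (pos_y : Int) (width : Int) (height : Int) (lines : List String), Dom_get_adj_numbers_prod pos_x pos_y width height lines → Raises_get_adj_numbers_prod pos_x pos_y width height lines → ¬ Pre_get_adj_numbers_prod pos_x pos_y width height lines) ∧ (Dom_get_adj_numbers_prod (pvRaiseWitness_get_adj_numbers_prod.1) (pvRaiseWitness_get_adj_numbers_prod.2.1) (pvRaiseWitness_get_adj_numbers_prod.2.2.1) (pvRaiseWitness_get_adj_numbers_prod.2.2.2.1) (pvRaiseWitness_get_adj_numbers_prod.2.2.2.2) ∧ Raises_get_adj_numbers_prod (pvRaiseWitness_get_adj_numbers_prod.1) (pvRaiseWitness_get_adj_numbers_prod.2.1) (pvRaiseWitness_get_adj_numbers_prod.2.2.1) (pvRaiseWitness_get_adj_numbers_prod.2.2.2.1) (pvRaiseWitness_get_adj_numbers_prod.2.2.2.2) ∧ get_adj_numbers_prod_alt (pvRaiseWitness_get_adj_numbers_prod.1) (pvRaiseWitness_get_adj_numbers_prod.2.1) (pvRaiseWitness_get_adj_numbers_prod.2.2.1) (pvRaiseWitness_get_adj_numbers_prod.2.2.2.1)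 (pvRaiseWitness_get_adj_numbers_prod.2.2.2.2) = pvRaiseWitnessOut_get_adj_numbers_prod)

-- ===== LEMMAS AND PROOFS =====

theorem pvWitness_ok : Dom_get_adj_numbers_prod pvWitness_get_adj_numbers_prod.1 pvWitness_get_adj_numbers_prod.2.1 pvWitness_get_adj_numbers_prod.2.2.1 pvWitness_get_adj_numbers_prod.2.2.2.1 pvWitness_get_adj_numbers_prod.2.2.2.2 ∧ Pre_get_adj_numbers_prod pvWitness_get_adj_numbers_prod.1 pvWitness_get_adj_numbers_prod.2.1 pvWitness_get_adj_numbers_prod.2.2.1 pvWitness_get_adj_numbers_prod.2.2.2.1 pvWitness_get_adj_numbers_prod.2.2.2.2 := by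
  constructor <;> decide

-- ---- structural facts about tokenize ----
theorem tok_wf (s : List Char) (i : Int) : ∀ t ∈ tokenize s i, i ≤ t.1 ∧ t.1 ≤ t.2.1 := by
  fun_induction tokenize s i with
  | case1 i => simp
  | case2 i c rest h run ih =>
    simp only [List.mem_cons]
    rintro t (rfl | ht)
    · have : 0 < run.length := by simp [run, List.takeWhile_cons_of_pos h]
      refine ⟨le_refl i, ?_⟩
      show i ≤ i + (run.length : Int) - 1; omega
    · have := ih t ht
      have hlen : 0 ≤ ((run.length : Nat) : Int) := by positivity
      exact ⟨by omega, this.2⟩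
  | case3 i c rest h ih =>
    intro t ht
    have := ih t ht
    exact ⟨by omega, this.2⟩

theorem tok_pw (s : List Char) (i : Int) :
    (tokenize s i).Pairwise (fun u v => u.2.1 < v.1) := by
  fun_induction tokenize s i with
  | case1 i => simp
  | case2 i c rest h run ih =>
    refine List.Pairwise.cons ?_ ih
    intro v hv
    have := (tok_wf _ _ v hv).1
    show i + ((run.length : Nat) : Int) - 1 < v.1
    omega
  | case3 i c rest h ih => exact ih

theorem tok_cover_digit (s : List Char) (i : Int) :
    ∀ t ∈ tokenize s i, ∀ cc : Int, t.1 ≤ cc → cc ≤ t.2.1 →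
      0 ≤ cc - i ∧ (cc - i).toNat < s.length ∧ pyNum (s.getD (cc - i).toNat ' ') = true := by
  fun_induction tokenize s i with
  | case1 i => simp
  | case2 i c rest h run ih =>
    simp only [List.mem_cons]
    simp only [run] at *
    have hrunpos : 0 < ((c :: rest).takeWhile pyNum).length := by
      simp [List.takeWhile_cons_of_pos h]
    have hrunle : ((c :: rest).takeWhile pyNum).length ≤ (c :: rest).length :=
      (List.takeWhile_prefix pyNum).length_le
    have hlen : ((c :: rest).takeWhile pyNum).length + ((c :: rest).dropWhile pyNum).length
        = (c :: rest).length := by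
      conv_lhs => rw [← List.length_append]
      rw [List.takeWhile_append_dropWhile]
    rintro t (rfl | ht) cc h1 h2
    · simp only at h1 h2
      have h0 : 0 ≤ cc - i := by omega
      have hlt : (cc - i).toNat < ((c :: rest).takeWhile pyNum).length := by omega
      refine ⟨h0, by omega, ?_⟩
      conv_lhs => rw [← List.takeWhile_append_dropWhile (p := pyNum) (l := c :: rest)]
      rw [List.getD_append _ _ _ _ hlt]
      have hmem : ((c :: rest).takeWhile pyNum).getD (cc - i).toNat ' ' ∈ (c :: rest).takeWhile pyNum := by
        rw [List.getD_eq_getElem _ _ hlt]; exact List.getElem_mem _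
      exact List.mem_takeWhile_imp hmem
    · have hwf := (tok_wf _ _ t ht).1
      obtain ⟨g0, glt, gdig⟩ := ih t ht cc h1 h2
      refine ⟨by omega, by simp only [List.length_cons] at hlen ⊢; omega, ?_⟩
      have hidx : (cc - i).toNat
          = ((c :: rest).takeWhile pyNum).length + (cc - (i + ((c :: rest).takeWhile pyNum).length)).toNat := by
        omega
      conv_lhs => rw [← List.takeWhile_append_dropWhile (p := pyNum) (l := c :: rest)]
      rw [hidx, List.getD_append_right _ _ _ _ (by omega), Nat.add_sub_cancel_left]
      exact gdig
  | case3 i c rest h ih =>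
    intro t ht cc h1 h2
    obtain ⟨g0, glt, gdig⟩ := ih t ht cc h1 h2
    have hidx : (cc - i).toNat = (cc - (i+1)).toNat + 1 := by omega
    refine ⟨by omega, by simp only [List.length_cons]; omega, ?_⟩
    rw [hidx]
    simpa using gdig

theorem tok_start (s : List Char) (i : Int) :
    ∀ t ∈ tokenize s i, (t.1 - i).toNat = 0 ∨ pyNum (s.getD ((t.1 - i).toNat - 1) ' ') = false := by
  fun_induction tokenize s i with
  | case1 i => simp
  | case2 i c rest h run ih =>
    simp only [List.mem_cons]
    simp only [run] at *
    have hlen : ((c :: rest).takeWhile pyNum).length + ((c :: rest).dropWhile pyNum).length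
        = (c :: rest).length := by
      conv_lhs => rw [← List.length_append]
      rw [List.takeWhile_append_dropWhile]
    rintro t (rfl | ht)
    · left; simp
    · have hwf := tok_wf _ _ t ht
      by_cases hz : t.1 - (i + ((c :: rest).takeWhile pyNum).length) = 0
      · exfalso
        obtain ⟨h0, hlt, hdig⟩ := tok_cover_digit _ _ t ht t.1 le_rfl hwf.2
        rw [hz] at hlt hdig
        simp only [Int.toNat_zero] at hlt hdig
        have hne : (c :: rest).dropWhile pyNum ≠ [] := by
          intro he; rw [he] at hlt; simp at hlt
        have hhd : pyNum (((c :: rest).dropWhile pyNum).getD 0 ' ') = false := by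
          rw [List.getD_eq_getElem _ _ (by exact List.length_pos_iff.mpr hne),
            List.getElem_zero]
          exact List.head_dropWhile_not pyNum hne
        rw [hdig] at hhd; simp at hhd
      · rcases ih t ht with h0 | hnd
        · exfalso; omega
        · right
          have hidx : (t.1 - i).toNat - 1
              = ((c :: rest).takeWhile pyNum).length
                + ((t.1 - (i + ((c :: rest).takeWhile pyNum).length)).toNat - 1) := by
            omega
          conv_lhs => rw [← List.takeWhile_append_dropWhile (p := pyNum) (l := c :: rest)]
          rw [hidx, List.getD_append_right _ _ _ _ (by omega), Nat.add_sub_cancel_left]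
          exact hnd
  | case3 i c rest h ih =>
    intro t ht
    have hwf := tok_wf _ _ t ht
    by_cases ht1 : t.1 = i + 1
    · right
      have hz : (t.1 - i).toNat - 1 = 0 := by omega
      rw [hz]
      simpa using Bool.eq_false_iff.mpr h
    · rcases ih t ht with h0 | hnd
      · exfalso; omega
      · right
        have hidx : (t.1 - i).toNat - 1 = ((t.1 - (i+1)).toNat - 1) + 1 := by omega
        rw [hidx]
        simpa using hnd

theorem tok_val (s : List Char) (i : Int) :
    ∀ t ∈ tokenize s i,
      t.2.2 = (PySem.Int.ofChars? ((s.drop (t.1 - i).toNat).takeWhile pyNum)).getD 0 := by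
  fun_induction tokenize s i with
  | case1 i => simp
  | case2 i c rest h run ih =>
    simp only [List.mem_cons]
    simp only [run] at *
    have hlen : ((c :: rest).takeWhile pyNum).length + ((c :: rest).dropWhile pyNum).length
        = (c :: rest).length := by
      conv_lhs => rw [← List.length_append]
      rw [List.takeWhile_append_dropWhile]
    rintro t (rfl | ht)
    · simp
    · have hwf := (tok_wf _ _ t ht).1
      rw [ih t ht]
      have hidx : (t.1 - i).toNat
          = ((c :: rest).takeWhile pyNum).length
            + (t.1 - (i + ((c :: rest).takeWhile pyNum).length)).toNat := by omega
      have hdrop : List.drop (t.1 - i).toNat (c :: rest)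
          = List.drop (t.1 - (i + ((c :: rest).takeWhile pyNum).length)).toNat
              ((c :: rest).dropWhile pyNum) := by
        conv_lhs => rw [← List.takeWhile_append_dropWhile (p := pyNum) (l := c :: rest)]
        rw [hidx, List.drop_append, List.drop_eq_nil_of_le (by omega), List.nil_append,
          Nat.add_sub_cancel_left]
      rw [hdrop]
  | case3 i c rest h ih =>
    intro t ht
    have hwf := (tok_wf _ _ t ht).1
    rw [ih t ht]
    have hidx : (t.1 - i).toNat = ((t.1 - (i+1)).toNat) + 1 := by omega
    rw [hidx, List.drop_succ_cons]

theorem tok_exists (s : List Char) (i : Int) :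
    ∀ k : Nat, k < s.length → pyNum (s.getD k ' ') = true →
      ∃ t ∈ tokenize s i, t.1 ≤ i + k ∧ i + k ≤ t.2.1 := by
  fun_induction tokenize s i with
  | case1 i => simp
  | case2 i c rest h run ih =>
    simp only [run] at *
    have hlen : ((c :: rest).takeWhile pyNum).length + ((c :: rest).dropWhile pyNum).length
        = (c :: rest).length := by
      conv_lhs => rw [← List.length_append]
      rw [List.takeWhile_append_dropWhile]
    intro k hk hdig
    by_cases hkr : k < ((c :: rest).takeWhile pyNum).length
    · refine ⟨_, List.mem_cons_self, ?_, ?_⟩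
      · show i ≤ i + (k : Int); omega
      · show i + (k : Int) ≤ i + (((c :: rest).takeWhile pyNum).length : Int) - 1; omega
    · have hk' : k - ((c :: rest).takeWhile pyNum).length < ((c :: rest).dropWhile pyNum).length := by
        omega
      have hdig' : pyNum (((c :: rest).dropWhile pyNum).getD (k - ((c :: rest).takeWhile pyNum).length) ' ') = true := by
        rw [← hdig]
        conv_rhs => rw [← List.takeWhile_append_dropWhile (p := pyNum) (l := c :: rest)]
        rw [List.getD_append_right _ _ _ _ (by omega)]
      obtain ⟨t, ht, h1, h2⟩ := ih _ hk' hdig'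
      refine ⟨t, List.mem_cons_of_mem _ ht, ?_, ?_⟩
      · have : ((k - ((c :: rest).takeWhile pyNum).length : Nat) : Int)
            = (k : Int) - ((c :: rest).takeWhile pyNum).length := by omega
        rw [this] at h1; omega
      · have : ((k - ((c :: rest).takeWhile pyNum).length : Nat) : Int)
            = (k : Int) - ((c :: rest).takeWhile pyNum).length := by omega
        rw [this] at h2; omega
  | case3 i c rest h ih =>
    intro k hk hdig
    match k with
    | 0 => simp at hdig; rw [hdig] at h; simp at h
    | (k+1) =>
      simp only [List.getD_cons_succ] at hdig
      obtain ⟨t, ht, h1, h2⟩ := ih k (by simpa using Nat.lt_of_succ_lt_succ hk) hdig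
      refine ⟨t, ht, by push_cast at h1 ⊢; omega, by push_cast at h2 ⊢; omega⟩

theorem cover_uniq (l : List (Int × Int × Int))
    (hpw : l.Pairwise (fun u v => u.2.1 < v.1)) (hwf : ∀ t ∈ l, t.1 ≤ t.2.1) :
    ∀ u ∈ l, ∀ v ∈ l, ∀ cc : Int, u.1 ≤ cc → cc ≤ u.2.1 → v.1 ≤ cc → cc ≤ v.2.1 → u = v := by
  induction l with
  | nil => simp
  | cons a tl ih =>
    have hR := List.pairwise_cons.mp hpw
    intro u hu v hv cc hu1 hu2 hv1 hv2
    rcases List.mem_cons.mp hu with rfl | hu' <;> rcases List.mem_cons.mp hv with rfl | hv'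
    · rfl
    · exact absurd (hR.1 v hv') (by omega)
    · exact absurd (hR.1 u hu') (by omega)
    · exact ih hR.2 (fun t ht => hwf t (List.mem_cons_of_mem _ ht)) u hu' v hv' cc hu1 hu2 hv1 hv2

theorem filter_pair {α : Type} [DecidableEq α] (R : α → α → Prop) (l : List α)
    (p q : α → Bool) (t : α) (hpw : l.Pairwise R) (ht : t ∈ l)
    (hpt : p t = true) (hqt : q t = false)
    (hbef : ∀ u ∈ l, R u t → p u = false ∧ q u = false)
    (haft : ∀ u ∈ l, R t u → p u = q u) :
    l.filter p = t :: l.filter q := by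
  induction l with
  | nil => simp at ht
  | cons a tl ih =>
    have hR := List.pairwise_cons.mp hpw
    rcases List.mem_cons.mp ht with rfl | ht'
    · rw [List.filter_cons_of_pos hpt, List.filter_cons_of_neg (by simp [hqt])]
      congr 1
      apply List.filter_congr
      intro u hu
      exact haft u (List.mem_cons_of_mem _ hu) (hR.1 u hu)
    · have hat := hbef a List.mem_cons_self (hR.1 t ht')
      rw [List.filter_cons_of_neg (by simp [hat.1]), List.filter_cons_of_neg (by simp [hat.2])]
      exact ih hR.2 ht' (fun u hu hut => hbef u (List.mem_cons_of_mem _ hu) hut)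
        (fun u hu htu => haft u (List.mem_cons_of_mem _ hu) htu)

-- ---- facts about A's scanning loops ----
theorem scanLeftA_le (s : List Char) (k : Nat) : scanLeftA s k ≤ k := by
  induction k with
  | zero => simp [scanLeftA]
  | succ k ih => rw [scanLeftA]; split <;> omega

theorem scanLeftA_digits (s : List Char) (k : Nat) :
    ∀ m, scanLeftA s k ≤ m → m < k → pyNum (s.getD m ' ') = true := by
  induction k with
  | zero => omega
  | succ k ih =>
    intro m h1 h2
    rw [scanLeftA] at h1
    split at h1
    · rcases Nat.lt_or_ge m k with hm | hm
      · exact ih m h1 hm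
      · have : m = k := by omega
        subst this; assumption
    · omega

theorem scanLeftA_boundary (s : List Char) (k : Nat) :
    scanLeftA s k = 0 ∨ pyNum (s.getD (scanLeftA s k - 1) ' ') = false := by
  induction k with
  | zero => left; simp [scanLeftA]
  | succ k ih =>
    rw [scanLeftA]
    split
    · exact ih
    · right; simpa using Bool.eq_false_iff.mpr (by assumption)

theorem scanRightA_eq (s : List Char) (idx : Nat) :
    scanRightA s idx = (s.drop idx).takeWhile pyNum := by
  fun_induction scanRightA s idx with
  | case1 idx hlt hdig ih =>
    rw [List.drop_eq_getElem_cons hlt, List.getD_eq_getElem _ _ hlt] at *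
    rw [List.takeWhile_cons_of_pos hdig, ih]
  | case2 idx hlt hdig =>
    rw [List.getD_eq_getElem _ _ hlt] at hdig
    rw [List.drop_eq_getElem_cons hlt, List.takeWhile_cons_of_neg (by simpa using hdig)]
  | case3 idx hge =>
    rw [List.drop_eq_nil_of_le (by omega)]
    simp

-- the token containing a digit cell starts exactly where A's left scan stops
theorem start_eq_scanLeft (s : List Char) (t : Int × Int × Int) (ht : t ∈ tokenize s 0)
    (k : Nat) (hk : k < s.length) (hdig : pyNum (s.getD k ' ') = true)
    (hc1 : t.1 ≤ (k : Int)) (hc2 : (k : Int) ≤ t.2.1) : t.1 = (scanLeftA s k : Int) := by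
  have hwf := tok_wf s 0 t ht
  have h0 : 0 ≤ t.1 := by simpa using hwf.1
  set a := t.1.toNat with ha
  have hta : t.1 = (a : Int) := by omega
  have hak : a ≤ k := by omega
  set r := scanLeftA s k with hrdef
  have hrk : r ≤ k := scanLeftA_le s k
  -- all positions in [a, k] are digits (covered by t)
  have htokdig : ∀ m : Nat, a ≤ m → m ≤ k → pyNum (s.getD m ' ') = true := by
    intro m h1 h2
    have := tok_cover_digit s 0 t ht (m : Int) (by omega) (by omega)
    simpa using this.2.2
  -- all positions in [r, k) are digits (scan invariant), and k itself
  have hscandig : ∀ m : Nat, r ≤ m → m ≤ k → pyNum (s.getD m ' ') = true := by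
    intro m h1 h2
    rcases Nat.lt_or_ge m k with hm | hm
    · exact scanLeftA_digits s k m h1 hm
    · have : m = k := by omega
      subst this; exact hdig
  rcases Nat.lt_trichotomy a r with hlt | heq | hgt
  · -- a < r: position r-1 is a digit covered by t, contradicting scan boundary
    exfalso
    rcases scanLeftA_boundary s k with h0r | hbd
    · omega
    · have : pyNum (s.getD (r - 1) ' ') = true := htokdig (r-1) (by omega) (by omega)
      rw [this] at hbd; simp at hbd
  · omega
  · -- r < a: position a-1 is a digit by the scan, contradicting token start boundary
    exfalso
    rcases tok_start s 0 t ht with h0a | hbd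
    · simp only [Int.sub_zero] at h0a; omega
    · simp only [Int.sub_zero] at hbd
      have : pyNum (s.getD (a - 1) ' ') = true := hscandig (a-1) (by omega) (by omega)
      rw [← ha] at hbd
      rw [this] at hbd; simp at hbd

-- ---- the window fold ----
def cellsFrom : Int → Nat → List Int
  | _, 0 => []
  | c, n+1 => c :: cellsFrom (c+1) n

-- one step of A's inner loop at a cell whose row/column guard already passed
def procCell (lines : List String) (r : Int) (st : Option Int × List Int) (c : Int) :
    Option Int × List Int :=
  match (PySem.List.pyGet? lines r).bind (fun line => PySem.Str.pyGet? line c) with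
  | some el =>
    if pyNum el then
      let t := get_comp_number c r lines
      if st.1 = none ∨ st.1 ≠ some t.2 then (some t.2, st.2 ++ [t.1]) else st
    else st
  | none => st

theorem foldInv (lines : List String) (r : Int) (s : List Char)
    (hs : s = ((PySem.List.pyGet? lines r).getD "").toList)
    (lo hi : Int) (hlo : 0 ≤ lo) (hlohi : lo ≤ hi)
    (hwin : ∀ c : Int, lo ≤ c → c ≤ hi → c.toNat < s.length)
    (hr : 0 ≤ r) (hrlen : r.toNat < lines.length) :
    ∀ (n : Nat) (c : Int) (f : Option Int) (acc : List Int),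
      lo ≤ c → c + n = hi + 1 →
      (∀ u ∈ tokenize s 0, some u.1 = f → u.2.1 < c ∨ (u.1 ≤ c ∧ c ≤ u.2.1)) →
      (∀ u ∈ tokenize s 0, u.1 < c → c ≤ u.2.1 → some u.1 = f ∨ c = lo) →
      ((cellsFrom c n).foldl (procCell lines r) (f, acc)).2
        = acc ++ ((tokenize s 0).filter
            (fun u => decide (u.1 ≤ hi ∧ c ≤ u.2.1 ∧ some u.1 ≠ f))).map (fun u => u.2.2) := by
  have hwfL := tok_wf s 0
  have hpwL := tok_pw s 0
  have huniq := cover_uniq (tokenize s 0) hpwL (fun t ht => (hwfL t ht).2)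
  intro n
  induction n with
  | zero =>
    intro c f acc hlc hcn hQ hS
    simp only [cellsFrom, List.foldl_nil]
    have hnil : (tokenize s 0).filter
        (fun u => decide (u.1 ≤ hi ∧ c ≤ u.2.1 ∧ some u.1 ≠ f)) = [] := by
      apply List.filter_eq_nil_iff.mpr
      intro u hu
      simp only [decide_eq_true_eq, not_and]
      intro h1 h2
      rcases hS u hu (by omega) h2 with hf | hl
      · simp [hf]
      · omega
    rw [hnil]; simp
  | succ n ih =>
    intro c f acc hlc hcn hQ hS
    have hchi : c ≤ hi := by omega
    have hc0 : 0 ≤ c := le_trans hlo hlc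
    have hk : c.toNat < s.length := hwin c hlc hchi
    have hkc : ((c.toNat : Nat) : Int) = c := Int.toNat_of_nonneg hc0
    have hline : PySem.List.pyGet? lines r = some (lines.getD r.toNat "") := by
      rw [PySem.List.pyGet?_of_nonneg _ hr, List.getElem?_eq_getElem hrlen,
        List.getD_eq_getElem _ _ hrlen]
    have hgetel : (PySem.List.pyGet? lines r).bind (fun line => PySem.Str.pyGet? line c)
        = some (s.getD c.toNat ' ') := by
      have hsl : (lines.getD r.toNat "").toList = s := by
        rw [hs, hline]; rfl
      have hbr : PySem.Str.pyGet? (lines.getD r.toNat "") c = PySem.List.pyGet? s c := by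
        rw [← hsl]; simp [pysem]
      rw [hline, Option.bind_some, hbr, PySem.List.pyGet?_of_nonneg _ hc0,
        List.getElem?_eq_getElem hk, List.getD_eq_getElem _ _ hk]
    have hcomp : get_comp_number c r lines
        = ((PySem.Int.ofChars? (scanRightA s (scanLeftA s c.toNat))).getD 0,
           ((scanLeftA s c.toNat : Nat) : Int)) := by
      simp only [get_comp_number, ← hs]
    simp only [cellsFrom, List.foldl_cons]
    by_cases hd : pyNum (s.getD c.toNat ' ') = true
    · obtain ⟨t, ht, hcov1, hcov2⟩ := tok_exists s 0 c.toNat hk hd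
      rw [zero_add] at hcov1 hcov2
      rw [hkc] at hcov1 hcov2
      have hstart : t.1 = ((scanLeftA s c.toNat : Nat) : Int) :=
        start_eq_scanLeft s t ht c.toNat hk hd (by omega) (by omega)
      have hvalt : t.2.2 = (PySem.Int.ofChars? (scanRightA s (scanLeftA s c.toNat))).getD 0 := by
        rw [tok_val s 0 t ht, scanRightA_eq]
        congr 2
        rw [Int.sub_zero, hstart, Int.toNat_natCast]
      have hproc : procCell lines r (f, acc) c
          = if f = none ∨ f ≠ some t.1 then (some t.1, acc ++ [t.2.2]) else (f, acc) := by
        unfold procCell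
        rw [hgetel]
        simp only [hd, if_true, hcomp, ← hstart, ← hvalt]
      rw [hproc]
      by_cases hf : f = some t.1
      · rw [if_neg (by simp [hf])]
        rw [ih (c+1) f acc (by omega) (by omega)
          (by
            intro u hu hef
            have hu1 : u.1 = t.1 := by rw [hf] at hef; exact Option.some.inj hef
            have : u = t := huniq u hu t ht t.1 (le_of_eq hu1)
              (hu1 ▸ (hwfL u hu).2) le_rfl ((hwfL t ht).2)
            subst this
            rcases Int.lt_or_le u.2.1 (c+1) with h | h
            · left; exact h
            · right; exact ⟨by omega, h⟩)
          (by
            intro u hu h1 h2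
            have : u = t := huniq u hu t ht c (by omega) (by omega) (by omega) (by omega)
            subst this
            left; rw [hf])]
        congr 1
        apply congrArg
        apply List.filter_congr
        intro u hu
        simp only [decide_eq_decide]
        constructor
        · rintro ⟨h1, h2, h3⟩
          exact ⟨h1, by omega, h3⟩
        · rintro ⟨h1, h2, h3⟩
          refine ⟨h1, ?_, h3⟩
          rcases Int.lt_or_le c u.2.1 with h | h
          · omega
          · exfalso
            have hu21 : u.2.1 = c := by omega
            have : u = t := huniq u hu t ht c (by have := (hwfL u hu).2; omega)
              (by omega) (by omega) (by omega)
            subst this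
            exact h3 (by rw [hf])
      · rw [if_pos (by tauto)]
        rw [ih (c+1) (some t.1) (acc ++ [t.2.2]) (by omega) (by omega)
          (by
            intro u hu hef
            have hu1 : u.1 = t.1 := Option.some.inj hef
            have : u = t := huniq u hu t ht t.1 (le_of_eq hu1)
              (hu1 ▸ (hwfL u hu).2) le_rfl ((hwfL t ht).2)
            subst this
            rcases Int.lt_or_le u.2.1 (c+1) with h | h
            · left; exact h
            · right; exact ⟨by omega, h⟩)
          (by
            intro u hu h1 h2
            have : u = t := huniq u hu t ht c (by omega) (by omega) (by omega) (by omega)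
            subst this
            left; rfl)]
        have hdecomp := filter_pair (R := fun u v : Int × Int × Int => u.2.1 < v.1)
          (l := tokenize s 0)
          (p := fun u => decide (u.1 ≤ hi ∧ c ≤ u.2.1 ∧ some u.1 ≠ f))
          (q := fun u => decide (u.1 ≤ hi ∧ c + 1 ≤ u.2.1 ∧ some u.1 ≠ some t.1))
          t hpwL ht
          (by simp only [decide_eq_true_eq]; exact ⟨by omega, by omega, fun h => hf h.symm⟩)
          (by simp)
          (by
            intro u hu hR
            constructor <;>
              · simp only [decide_eq_false_iff_not, not_and]
                intro h1 h2
                omega)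
          (by
            intro u hu hR
            have hwfu := (hwfL u hu).2
            simp only [decide_eq_decide]
            constructor
            · rintro ⟨h1, h2, h3⟩
              exact ⟨h1, by omega, fun he => by
                have : u.1 = t.1 := Option.some.inj he
                omega⟩
            · rintro ⟨h1, h2, h3⟩
              refine ⟨h1, by omega, fun he => ?_⟩
              rcases hQ u hu he with h | h <;> omega)
        rw [hdecomp]
        simp
    · have hproc : procCell lines r (f, acc) c = (f, acc) := by
        unfold procCell
        rw [hgetel]
        simp only [hd, if_false, Bool.false_eq_true]
      have hnocov : ∀ u ∈ tokenize s 0, ¬(u.1 ≤ c ∧ c ≤ u.2.1) := by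
        rintro u hu ⟨h1, h2⟩
        obtain ⟨-, -, hdg⟩ := tok_cover_digit s 0 u hu c h1 h2
        rw [Int.sub_zero] at hdg
        exact hd hdg
      rw [hproc]
      rw [ih (c+1) f acc (by omega) (by omega)
        (by
          intro u hu hef
          rcases hQ u hu hef with h | h
          · left; omega
          · exact absurd h (hnocov u hu))
        (by
          intro u hu h1 h2
          exact absurd ⟨by omega, by omega⟩ (hnocov u hu))]
      congr 1
      apply congrArg
      apply List.filter_congr
      intro u hu
      simp only [decide_eq_decide]
      constructor
      · rintro ⟨h1, h2, h3⟩
        exact ⟨h1, by omega, h3⟩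
      · rintro ⟨h1, h2, h3⟩
        refine ⟨h1, ?_, h3⟩
        rcases Int.lt_or_le c u.2.1 with h | h
        · omega
        · exact absurd ⟨by have := (hwfL u hu).2; omega, by omega⟩ (hnocov u hu)

theorem pyRange3 (a : Int) : PySem.List.pyRange (a - 1) (a + 2) 1 = [a - 1, a, a + 1] := by
  rw [PySem.List.pyRange_one]
  have h3 : (a + 2 - (a - 1)).toNat = 3 := by omega
  rw [h3]
  simp [List.range_succ]
  omega

theorem jfold (pos_x width height : Int) (lines : List String) (rr : Int)
    (hrow : 0 ≤ rr ∧ rr < height) (lo hi : Int)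
    (hlo : lo = max 0 (pos_x - 1)) (hhi : hi = min (width - 1) (pos_x + 1)) (hlh : lo ≤ hi)
    (st0 : Option Int × List Int) :
    ([-1, 0, 1] : List Int).foldl (fun (st : Option Int × List Int) j =>
      if 0 ≤ pos_x + j ∧ pos_x + j < width ∧ 0 ≤ rr ∧ rr < height then
        match (PySem.List.pyGet? lines rr).bind (fun line => PySem.Str.pyGet? line (pos_x + j)) with
        | some el =>
          if pyNum el then
            if st.1 = none ∨ st.1 ≠ some (get_comp_number (pos_x + j) rr lines).2 then
              (some (get_comp_number (pos_x + j) rr lines).2,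
                st.2 ++ [(get_comp_number (pos_x + j) rr lines).1])
            else st
          else st
        | none => st
      else st) st0
    = (cellsFrom lo (hi + 1 - lo).toNat).foldl (procCell lines rr) st0 := by
  have hb : ∀ (st : Option Int × List Int) (j : Int),
      (if 0 ≤ pos_x + j ∧ pos_x + j < width ∧ 0 ≤ rr ∧ rr < height then
        match (PySem.List.pyGet? lines rr).bind (fun line => PySem.Str.pyGet? line (pos_x + j)) with
        | some el =>
          if pyNum el then
            if st.1 = none ∨ st.1 ≠ some (get_comp_number (pos_x + j) rr lines).2 then
              (some (get_comp_number (pos_x + j) rr lines).2,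
                st.2 ++ [(get_comp_number (pos_x + j) rr lines).1])
            else st
          else st
        | none => st
      else st)
      = if 0 ≤ pos_x + j ∧ pos_x + j < width then procCell lines rr st (pos_x + j) else st := by
    intro st j
    by_cases hcol : 0 ≤ pos_x + j ∧ pos_x + j < width
    · rw [if_pos ⟨hcol.1, hcol.2, hrow.1, hrow.2⟩, if_pos hcol]
      rfl
    · rw [if_neg (by tauto), if_neg hcol]
  simp only [List.foldl_cons, List.foldl_nil, hb]
  by_cases g1 : 0 ≤ pos_x + -1 ∧ pos_x + -1 < width <;>
    by_cases g2 : 0 ≤ pos_x + 0 ∧ pos_x + 0 < width <;>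
      by_cases g3 : 0 ≤ pos_x + 1 ∧ pos_x + 1 < width
  · -- all three columns valid
    rw [if_pos g1, if_pos g2, if_pos g3, show (hi + 1 - lo).toNat = 3 from by omega]
    simp only [cellsFrom, List.foldl_cons, List.foldl_nil]
    rw [show lo + 1 + 1 = pos_x + 1 from by omega, show lo + 1 = pos_x + 0 from by omega,
      show lo = pos_x + -1 from by omega]
  · -- left and middle valid
    rw [if_pos g1, if_pos g2, if_neg g3, show (hi + 1 - lo).toNat = 2 from by omega]
    simp only [cellsFrom, List.foldl_cons, List.foldl_nil]
    rw [show lo + 1 = pos_x + 0 from by omega, show lo = pos_x + -1 from by omega]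
  · exact absurd ⟨by omega, by omega⟩ g2
  · -- only leftmost column valid
    rw [if_pos g1, if_neg g2, if_neg g3, show (hi + 1 - lo).toNat = 1 from by omega]
    simp only [cellsFrom, List.foldl_cons, List.foldl_nil]
    rw [show lo = pos_x + -1 from by omega]
  · -- middle and right valid
    rw [if_neg g1, if_pos g2, if_pos g3, show (hi + 1 - lo).toNat = 2 from by omega]
    simp only [cellsFrom, List.foldl_cons, List.foldl_nil]
    rw [show lo + 1 = pos_x + 1 from by omega, show lo = pos_x + 0 from by omega]
  · -- only middle valid
    rw [if_neg g1, if_pos g2, if_neg g3, show (hi + 1 - lo).toNat = 1 from by omega]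
    simp only [cellsFrom, List.foldl_cons, List.foldl_nil]
    rw [show lo = pos_x + 0 from by omega]
  · -- only right valid
    rw [if_neg g1, if_neg g2, if_pos g3, show (hi + 1 - lo).toNat = 1 from by omega]
    simp only [cellsFrom, List.foldl_cons, List.foldl_nil]
    rw [show lo = pos_x + 1 from by omega]
  · -- no valid column: contradicts lo ≤ hi
    exfalso; omega

theorem rowEq (pos_x pos_y width height : Int) (lines : List String)
    (hpre : Pre_get_adj_numbers_prod pos_x pos_y width height lines)
    (lo hi : Int) (hlo : lo = max 0 (pos_x - 1)) (hhi : hi = min (width - 1) (pos_x + 1))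
    (hlh : lo ≤ hi)
    (rr : Int) (hrr : pos_y - 1 ≤ rr ∧ rr ≤ pos_y + 1) (nums : List Int) :
    (([-1, 0, 1] : List Int).foldl (fun (st : Option Int × List Int) j =>
      if 0 ≤ pos_x + j ∧ pos_x + j < width ∧ 0 ≤ rr ∧ rr < height then
        match (PySem.List.pyGet? lines rr).bind (fun line => PySem.Str.pyGet? line (pos_x + j)) with
        | some el =>
          if pyNum el then
            if st.1 = none ∨ st.1 ≠ some (get_comp_number (pos_x + j) rr lines).2 then
              (some (get_comp_number (pos_x + j) rr lines).2,
                st.2 ++ [(get_comp_number (pos_x + j) rr lines).1])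
            else st
          else st
        | none => st
      else st) (none, nums)).2
    = (if 0 ≤ rr ∧ rr < height then
        (tokenize ((PySem.List.pyGet? lines rr).getD "").toList 0).foldl
          (fun vals t => if t.1 ≤ hi ∧ lo ≤ t.2.1 then vals ++ [t.2.2] else vals) nums
       else nums) := by
  by_cases hrow : 0 ≤ rr ∧ rr < height
  · rw [if_pos hrow]
    -- Pre_ facts for this row
    have hj0mem : lo - pos_x ∈ ([-1, 0, 1] : List Int) := by simp; omega
    have hi0mem : rr - pos_y ∈ ([-1, 0, 1] : List Int) := by simp; omega
    have hpre0 := hpre (rr - pos_y) hi0mem (lo - pos_x) hj0mem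
      (by omega) (by omega) (by omega) (by omega)
    have hrlen : rr.toNat < lines.length := by omega
    have hline : PySem.List.pyGet? lines rr = some (lines.getD rr.toNat "") := by
      rw [PySem.List.pyGet?_of_nonneg _ hrow.1, List.getElem?_eq_getElem hrlen,
        List.getD_eq_getElem _ _ hrlen]
    have hwin : ∀ c : Int, lo ≤ c → c ≤ hi →
        c.toNat < (((PySem.List.pyGet? lines rr).getD "").toList).length := by
      intro c h1 h2
      have hjmem : c - pos_x ∈ ([-1, 0, 1] : List Int) := by simp; omega
      have := hpre (rr - pos_y) hi0mem (c - pos_x) hjmem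
        (by omega) (by omega) (by omega) (by omega)
      have hyy : pos_y + (rr - pos_y) = rr := by ring
      have hxx : pos_x + (c - pos_x) = c := by ring
      rw [hyy, hxx] at this
      rw [hline]
      have : (lines.getD rr.toNat "").toList.length = ((some (lines.getD rr.toNat "")).getD "").toList.length := rfl
      omega
    rw [jfold pos_x width height lines rr hrow lo hi hlo hhi hlh (none, nums)]
    rw [foldInv lines rr (((PySem.List.pyGet? lines rr).getD "").toList) rfl lo hi
      (by omega) hlh hwin hrow.1 hrlen ((hi + 1 - lo).toNat) lo none nums le_rfl (by omega)
      (by simp) (fun u hu h1 h2 => Or.inr rfl)]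
    rw [PySem.List.foldl_append_ite (p := fun t : Int × Int × Int => t.1 ≤ hi ∧ lo ≤ t.2.1)
      (f := fun t : Int × Int × Int => t.2.2)]
    congr 1
    apply congrArg
    apply List.filter_congr
    intro u hu
    simp
  · rw [if_neg hrow]
    have hid : ([-1, 0, 1] : List Int).foldl (fun (st : Option Int × List Int) j =>
      if 0 ≤ pos_x + j ∧ pos_x + j < width ∧ 0 ≤ rr ∧ rr < height then
        match (PySem.List.pyGet? lines rr).bind (fun line => PySem.Str.pyGet? line (pos_x + j)) with
        | some el =>
          if pyNum el then
            if st.1 = none ∨ st.1 ≠ some (get_comp_number (pos_x + j) rr lines).2 then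
              (some (get_comp_number (pos_x + j) rr lines).2,
                st.2 ++ [(get_comp_number (pos_x + j) rr lines).1])
            else st
          else st
        | none => st
      else st) (none, nums) = (none, nums) := by
      refine Eq.trans (PySem.List.foldl_congr_mem _ _ (fun st _ => st) _ ?_)
        (PySem.List.foldl_ignore _ _)
      intro st j hj
      rw [if_neg (by tauto)]
    rw [hid]

-- ===== VERDICT (by name: the statement is the Claim_ definition above) =====
set_option maxHeartbeats 2000000 in
theorem get_adj_numbers_prod_spec : Claim_equal_get_adj_numbers_prod := by
  intro pos_x pos_y width height lines hdom hpre
  unfold Spec_get_adj_numbers_prod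
  simp only [get_adj_numbers_prod, get_adj_numbers_prod_alt]
  set lo := max 0 (pos_x - 1) with hlodef
  set hi := min (width - 1) (pos_x + 1) with hhidef
  by_cases hlh : lo ≤ hi
  · conv_rhs => rw [if_neg (show ¬ lo > hi from by omega)]
    have hmain : (PySem.List.pyRange (-1) 2 1).foldl (fun (nums : List Int) i =>
        ((PySem.List.pyRange (-1) 2 1).foldl (fun (st : Option Int × List Int) j =>
          if 0 ≤ pos_x + j ∧ pos_x + j < width ∧ 0 ≤ pos_y + i ∧ pos_y + i < height then
            match (PySem.List.pyGet? lines (pos_y + i)).bind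
                (fun line => PySem.Str.pyGet? line (pos_x + j)) with
            | some el =>
              if pyNum el then
                if st.1 = none ∨ st.1 ≠ some (get_comp_number (pos_x + j) (pos_y + i) lines).2 then
                  (some (get_comp_number (pos_x + j) (pos_y + i) lines).2,
                    st.2 ++ [(get_comp_number (pos_x + j) (pos_y + i) lines).1])
                else st
              else st
            | none => st
          else st) (none, nums)).2) []
      = (PySem.List.pyRange (pos_y - 1) (pos_y + 2) 1).foldl (fun (vals : List Int) row =>
          if 0 ≤ row ∧ row < height then
            (tokenize ((PySem.List.pyGet? lines row).getD "").toList 0).foldl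
              (fun vals t => if t.1 ≤ hi ∧ lo ≤ t.2.1 then vals ++ [t.2.2] else vals) vals
          else vals) [] := by
      rw [show PySem.List.pyRange (-1) 2 1 = [-1, 0, 1] from by decide, pyRange3 pos_y]
      rw [show ([pos_y - 1, pos_y, pos_y + 1] : List Int)
          = List.map (fun i => pos_y + i) [-1, 0, 1] from by simp; omega]
      rw [List.foldl_map]
      apply PySem.List.foldl_congr_mem
      intro nums i hi'
      have hb : -1 ≤ i ∧ i ≤ 1 := by
        fin_cases hi' <;> omega
      exact rowEq pos_x pos_y width height lines hpre lo hi hlodef hhidef hlh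
        (pos_y + i) (by omega) nums
    rw [hmain]
  · conv_rhs => rw [if_pos (show lo > hi from by omega)]
    have houter : (PySem.List.pyRange (-1) 2 1).foldl (fun (nums : List Int) i =>
        ((PySem.List.pyRange (-1) 2 1).foldl (fun (st : Option Int × List Int) j =>
          if 0 ≤ pos_x + j ∧ pos_x + j < width ∧ 0 ≤ pos_y + i ∧ pos_y + i < height then
            match (PySem.List.pyGet? lines (pos_y + i)).bind
                (fun line => PySem.Str.pyGet? line (pos_x + j)) with
            | some el =>
              if pyNum el then
                if st.1 = none ∨ st.1 ≠ some (get_comp_number (pos_x + j) (pos_y + i) lines).2 then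
                  (some (get_comp_number (pos_x + j) (pos_y + i) lines).2,
                    st.2 ++ [(get_comp_number (pos_x + j) (pos_y + i) lines).1])
                else st
              else st
            | none => st
          else st) (none, nums)).2) []
        = ([] : List Int) := by
      refine Eq.trans (PySem.List.foldl_congr_mem _ _ (fun nums _ => nums) _ ?_)
        (PySem.List.foldl_ignore _ _)
      intro nums i hi'
      have hinner : (PySem.List.pyRange (-1) 2 1).foldl (fun (st : Option Int × List Int) j =>
          if 0 ≤ pos_x + j ∧ pos_x + j < width ∧ 0 ≤ pos_y + i ∧ pos_y + i < height then
            match (PySem.List.pyGet? lines (pos_y + i)).bind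
                (fun line => PySem.Str.pyGet? line (pos_x + j)) with
            | some el =>
              if pyNum el then
                if st.1 = none ∨ st.1 ≠ some (get_comp_number (pos_x + j) (pos_y + i) lines).2 then
                  (some (get_comp_number (pos_x + j) (pos_y + i) lines).2,
                    st.2 ++ [(get_comp_number (pos_x + j) (pos_y + i) lines).1])
                else st
              else st
            | none => st
          else st) (none, nums) = (none, nums) := by
        refine Eq.trans (PySem.List.foldl_congr_mem _ _ (fun st _ => st) _ ?_)
          (PySem.List.foldl_ignore _ _)
        intro st j hj
        rw [PySem.List.mem_pyRange_one] at hj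
        rw [if_neg (by omega)]
      rw [hinner]
    rw [houter]
    simp

theorem get_adj_numbers_prod_raises : Claim_raises_get_adj_numbers_prod := by
  unfold Claim_raises_get_adj_numbers_prod
  refine ⟨fun _ _ _ _ _ _ hr => hr.1, by decide, by decide, ?_⟩
  show get_adj_numbers_prod_alt 1 0 3 1 ["12"] = 0
  have h12 : tokenize ['1', '2'] 0 = [(0, 1, 12)] := by simp [tokenize, pyNum]; rfl
  simp [get_adj_numbers_prod_alt,
    show PySem.List.pyRange (-1) 2 1 = [-1, 0, 1] from by decide, h12]

-- self-check: the recorded witness output is exactly what B's port returns there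
theorem pvRaisesWitness_ok :
    get_adj_numbers_prod_alt (pvRaiseWitness_get_adj_numbers_prod.1)
      (pvRaiseWitness_get_adj_numbers_prod.2.1) (pvRaiseWitness_get_adj_numbers_prod.2.2.1)
      (pvRaiseWitness_get_adj_numbers_prod.2.2.2.1) (pvRaiseWitness_get_adj_numbers_prod.2.2.2.2)
      = pvRaiseWitnessOut_get_adj_numbers_prod :=
  (get_adj_numbers_prod_raises).2.2.2
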